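-- pv_equiv track=rewrite | github.com/philipsteingruber/AoC2021 | day4/day4.py | winning_line
-- ===== SOURCE A (Python) =====
-- def winning_line(bingo_board):
--     for row in bingo_board:
--         marked_numbers = [number for number, checked in row if checked]
--         if len(marked_numbers) == 5:
--             return row
--     columns = []
--     for i in range(len(bingo_board)):
--         columns.append([row[i] for row in bingo_board])
--     for column in columns:
--         marked_numbers = [number for number, checked in column if checked]
--         if len(marked_numbers) == 5:
--             return column
--     return None
-- ===== SOURCE B (Python) =====
-- def winning_line(bingo_board):
--     n = len(bingo_board)
--     # one pass over all cells: count marked cells per row and per column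
--     row_counts = []
--     col_counts = [0] * n
--     for row in bingo_board:
--         cnt = 0
--         c = 0
--         for _, marked in row:
--             if marked:
--                 cnt += 1
--                 if c < n:
--                     col_counts[c] += 1
--             c += 1
--         row_counts.append(cnt)
--     # select: first fully-marked row, then first fully-marked column
--     for cnt, row in zip(row_counts, bingo_board):
--         if cnt == 5:
--             return row
--     for c, cnt in enumerate(col_counts):
--         if cnt == 5:
--             return [row[c] for row in bingo_board]
--     return None
-- ===== Notes on version B (the rewrite author's own statement) =====
-- stated objective: alternative
-- what changed: B replaces A's scan of rows and of a materialised columns list with a single pass over all cells that accumulates per-row and per-column marked counts, then selects the first row and first column whose count is 5.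
import Mathlib
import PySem

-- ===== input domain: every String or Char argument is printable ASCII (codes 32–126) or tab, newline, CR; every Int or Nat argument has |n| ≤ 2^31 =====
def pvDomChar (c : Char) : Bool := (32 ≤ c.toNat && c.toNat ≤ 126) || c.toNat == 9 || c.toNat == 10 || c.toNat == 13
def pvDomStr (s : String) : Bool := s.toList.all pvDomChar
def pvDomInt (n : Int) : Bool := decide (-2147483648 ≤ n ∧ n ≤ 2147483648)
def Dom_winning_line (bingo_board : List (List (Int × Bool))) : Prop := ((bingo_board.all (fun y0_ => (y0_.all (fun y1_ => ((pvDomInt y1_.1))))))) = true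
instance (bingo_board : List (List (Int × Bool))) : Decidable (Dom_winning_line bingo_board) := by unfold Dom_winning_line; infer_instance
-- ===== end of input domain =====

-- B makes one counting pass over all cells and then selects by count; A scans rows and a
-- materialised columns list directly.  Same return value on Pre_ (where A does not raise).

-- ===== PORT A =====
-- len([number for number, checked in line if checked])
def pvCntA (line : List (Int × Bool)) : Nat :=
  ((line.filter (fun p => p.2)).map (fun p => p.1)).length

-- the 'for line in …: if len(marked)==5: return line' loop (used for rows and for columns)
def pvScanA : List (List (Int × Bool)) → Option (List (Int × Bool))
  | [] => none
  | r :: rs => if pvCntA r = 5 then some r else pvScanA rs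

-- columns = []; for i in range(len(b)): columns.append([row[i] for row in b])
def pvColsA (b : List (List (Int × Bool))) : List (List (Int × Bool)) :=
  (PySem.List.pyRange 0 b.length 1).foldl
    (fun cols i => cols ++ [b.map (fun row => PySem.List.pyGetD row i (0, false))]) []

def winning_line (bingo_board : List (List (Int × Bool))) : Option (List (Int × Bool)) :=
  match pvScanA bingo_board with
  | some r => some r
  | none => pvScanA (pvColsA bingo_board)

-- ===== PORT B =====
-- inner loop body: for _, marked in row: if marked: cnt += 1; (if c < n: col_counts[c] += 1); c += 1
def pvCellStep (n : Nat) (st : Nat × Nat × List Nat) (cell : Int × Bool) : Nat × Nat × List Nat :=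
  match st with
  | (cnt, c, cc) =>
    if cell.2 then
      (cnt + 1, c + 1, if c < n then cc.set c (cc.getD c 0 + 1) else cc)
    else (cnt, c + 1, cc)

-- outer counting loop body: process one row, append its count
def pvRowStep (n : Nat) (st : List Nat × List Nat) (row : List (Int × Bool)) : List Nat × List Nat :=
  match row.foldl (pvCellStep n) (0, 0, st.2) with
  | (cnt, _, cc) => (st.1 ++ [cnt], cc)

-- for cnt, row in zip(row_counts, bingo_board): if cnt == 5: return row
def pvSelRow : List Nat → List (List (Int × Bool)) → Option (List (Int × Bool))
  | cnt :: cnts, row :: rows => if cnt = 5 then some row else pvSelRow cnts rows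
  | _, _ => none

-- for c, cnt in enumerate(col_counts): if cnt == 5: return [row[c] for row in bingo_board]
def pvSelCol (b : List (List (Int × Bool))) : Nat → List Nat → Option (List (Int × Bool))
  | _, [] => none
  | c, cnt :: cnts =>
    if cnt = 5 then some (b.map (fun row => PySem.List.pyGetD row (c : Int) (0, false)))
    else pvSelCol b (c + 1) cnts

def winning_line_alt (bingo_board : List (List (Int × Bool))) : Option (List (Int × Bool)) :=
  match bingo_board.foldl (pvRowStep bingo_board.length) ([], List.replicate bingo_board.length 0) with
  | (rcs, cc) =>
    match pvSelRow rcs bingo_board with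
    | some r => some r
    | none => pvSelCol bingo_board 0 cc

-- ===== PRECONDITION & SPEC =====
-- Pre_ excludes exactly the inputs on which A raises IndexError: no row has exactly 5 marked
-- cells and some row is shorter than the number of rows, so building the columns fails.
def Pre_winning_line (bingo_board : List (List (Int × Bool))) : Prop :=
  (∃ row ∈ bingo_board, row.countP (fun p => p.2) = 5) ∨
  (∀ row ∈ bingo_board, bingo_board.length ≤ row.length)
instance (bingo_board : List (List (Int × Bool))) : Decidable (Pre_winning_line bingo_board) := by
  unfold Pre_winning_line; infer_instance

def pvWitness_winning_line : (List (List (Int × Bool))) :=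
  List.replicate 5 [((1:Int), true), (2, false), (3, true), (4, false), (5, true)]

def Spec_winning_line (bingo_board : List (List (Int × Bool))) (out : Option (List (Int × Bool))) : Prop := out = winning_line_alt bingo_board
instance (bingo_board : List (List (Int × Bool))) (out : Option (List (Int × Bool))) : Decidable (Spec_winning_line bingo_board out) := by unfold Spec_winning_line; infer_instance

-- ===== CLAIM (what is proved, stated in full; the proofs are below) =====
def Claim_equal_winning_line : Prop := ∀ (bingo_board : List (List (Int × Bool))), Dom_winning_line bingo_board → Pre_winning_line bingo_board → Spec_winning_line bingo_board (winning_line bingo_board)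

-- ===== LEMMAS AND PROOFS =====

theorem pvCntA_eq_countP (line : List (Int × Bool)) :
    pvCntA line = line.countP (fun p => p.2) := by
  simp [pvCntA, List.countP_eq_length_filter]

theorem pvScanA_eq_none (b : List (List (Int × Bool))) :
    pvScanA b = none ↔ ∀ row ∈ b, pvCntA row ≠ 5 := by
  induction b with
  | nil => simp [pvScanA]
  | cons r rs ih =>
    by_cases h : pvCntA r = 5 <;> simp [pvScanA, h, ih]

theorem pvSelRow_eq_scanA (b : List (List (Int × Bool))) :
    pvSelRow (b.map (fun r => r.countP (fun p => p.2))) b = pvScanA b := by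
  induction b with
  | nil => rfl
  | cons r rs ih =>
    by_cases h : r.countP (fun p => p.2) = 5 <;>
      simp [pvSelRow, pvScanA, pvCntA_eq_countP, h, ih]

-- is cell number k of the row marked?
def pvHit (row : List (Int × Bool)) (k : Nat) : Bool :=
  match row[k]? with
  | some p => p.2
  | none => false

theorem pvCellFold_fst (n : Nat) (row : List (Int × Bool)) :
    ∀ (cnt c : Nat) (cc : List Nat),
    (row.foldl (pvCellStep n) (cnt, c, cc)).1 = cnt + row.countP (fun p => p.2) := by
  induction row with
  | nil => intro cnt c cc; simp
  | cons cell rest ih =>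
    intro cnt c cc
    by_cases h : cell.2 <;>
      simp [pvCellStep, h, ih] <;> omega

theorem pvCellFold_len (n : Nat) (row : List (Int × Bool)) :
    ∀ (cnt c : Nat) (cc : List Nat),
    (row.foldl (pvCellStep n) (cnt, c, cc)).2.2.length = cc.length := by
  induction row with
  | nil => intro cnt c cc; simp
  | cons cell rest ih =>
    intro cnt c cc
    by_cases h : cell.2 <;> by_cases hc : c < n <;>
      simp [pvCellStep, h, hc, ih]

theorem pvCellFold_snd (n : Nat) (row : List (Int × Bool)) :
    ∀ (cnt c : Nat) (cc : List Nat) (j : Nat), cc.length = n →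
    ((row.foldl (pvCellStep n) (cnt, c, cc)).2.2).getD j 0 =
      cc.getD j 0 + (if c ≤ j ∧ j < n ∧ pvHit row (j - c) then 1 else 0) := by
  induction row with
  | nil => intro cnt c cc j _; simp [pvHit]
  | cons cell rest ih =>
    intro cnt c cc j hlen
    have hind : ∀ (x : Nat),
        (if c + 1 ≤ j ∧ j < n ∧ pvHit rest (j - (c + 1)) then (1:Nat) else 0) = x →
        (j ≠ c → (if c ≤ j ∧ j < n ∧ pvHit (cell :: rest) (j - c) then (1:Nat) else 0) = x) := by
      intro x hx hj
      rw [← hx]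
      by_cases hcj : c ≤ j
      · have hcj1 : c + 1 ≤ j := by omega
        have hsub : j - c = (j - (c+1)) + 1 := by omega
        simp [hcj, hcj1, hsub, pvHit]
      · have h2 : ¬ (c + 1 ≤ j) := by omega
        simp [hcj, h2]
    by_cases h : cell.2
    · simp only [List.foldl_cons, pvCellStep, h, if_true]
      by_cases hc : c < n
      · rw [if_pos hc, ih _ _ _ j (by simp [hlen])]
        by_cases hj : j = c
        · subst hj
          have hjl : j < cc.length := by omega
          have hset : (cc.set j (cc.getD j 0 + 1)).getD j 0 = cc.getD j 0 + 1 := by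
            simp [List.getD_eq_getElem?_getD, List.getElem?_set_self', List.getElem?_eq_getElem hjl]
          rw [hset]
          have h1 : ¬ (j + 1 ≤ j) := by omega
          have h2 : (j ≤ j ∧ j < n ∧ pvHit (cell :: rest) (j - j) = true) := by
            refine ⟨le_refl _, hc, ?_⟩
            simp [pvHit, h]
          have hneg : ¬ (j + 1 ≤ j ∧ j < n ∧ pvHit rest (j - (j+1)) = true) :=
            fun hx => absurd hx.1 (by omega)
          rw [if_neg hneg, if_pos h2]
        · have hset : (cc.set c (cc.getD c 0 + 1)).getD j 0 = cc.getD j 0 := by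
            simp [List.getD_eq_getElem?_getD, List.getElem?_set_ne (by omega : c ≠ j)]
          rw [hset]
          congr 1
          exact (hind _ rfl hj).symm
      · rw [if_neg hc, ih _ _ _ j hlen]
        congr 1
        by_cases hj : j = c
        · subst hj
          have h1 : ¬ (j + 1 ≤ j) := by omega
          simp [h1, hc]
        · exact (hind _ rfl hj).symm
    · simp only [List.foldl_cons, pvCellStep, h, Bool.false_eq_true, if_false]
      rw [ih _ _ _ j hlen]
      congr 1
      by_cases hj : j = c
      · subst hj
        have h1 : ¬ (j + 1 ≤ j) := by omega
        simp [h1, pvHit, h]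
      · exact (hind _ rfl hj).symm

-- total contribution of the rows to column j
def pvColSum (n : Nat) (rows : List (List (Int × Bool))) (j : Nat) : Nat :=
  (rows.map (fun row => if j < n ∧ pvHit row j then 1 else 0)).sum

theorem pvRowFold_fst (n : Nat) (rows : List (List (Int × Bool))) :
    ∀ (rcs cc : List Nat),
    (rows.foldl (pvRowStep n) (rcs, cc)).1 = rcs ++ rows.map (fun r => r.countP (fun p => p.2)) := by
  induction rows with
  | nil => intro rcs cc; simp
  | cons row rest ih =>
    intro rcs cc
    simp only [List.foldl_cons, pvRowStep]
    have h1 := pvCellFold_fst n row 0 0 cc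
    rcases hfold : row.foldl (pvCellStep n) (0, 0, cc) with ⟨a, b, c⟩
    rw [hfold] at h1
    simp at h1
    simp [ih, h1]

theorem pvRowFold_len (n : Nat) (rows : List (List (Int × Bool))) :
    ∀ (rcs cc : List Nat),
    (rows.foldl (pvRowStep n) (rcs, cc)).2.length = cc.length := by
  induction rows with
  | nil => intro rcs cc; simp
  | cons row rest ih =>
    intro rcs cc
    simp only [List.foldl_cons, pvRowStep]
    have h1 := pvCellFold_len n row 0 0 cc
    rcases hfold : row.foldl (pvCellStep n) (0, 0, cc) with ⟨a, b, c⟩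
    rw [hfold] at h1
    simp at h1
    simp [ih, h1]

theorem pvRowFold_snd (n : Nat) (rows : List (List (Int × Bool))) :
    ∀ (rcs cc : List Nat) (j : Nat), cc.length = n →
    ((rows.foldl (pvRowStep n) (rcs, cc)).2).getD j 0 = cc.getD j 0 + pvColSum n rows j := by
  induction rows with
  | nil => intro rcs cc j _; simp [pvColSum]
  | cons row rest ih =>
    intro rcs cc j hlen
    simp only [List.foldl_cons, pvRowStep]
    have h1 := pvCellFold_snd n row 0 0 cc j hlen
    have h2 := pvCellFold_len n row 0 0 cc
    rcases hfold : row.foldl (pvCellStep n) (0, 0, cc) with ⟨a, b, c⟩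
    rw [hfold] at h1 h2
    simp only at h1 h2
    rw [ih _ _ j (by rw [h2, hlen])]
    simp only [pvColSum, List.map_cons, List.sum_cons, h1]
    have : (0 ≤ j ∧ j < n ∧ pvHit row (j - 0) = true) ↔ (j < n ∧ pvHit row j = true) := by
      constructor
      · rintro ⟨_, h, hh⟩; exact ⟨h, by simpa using hh⟩
      · rintro ⟨h, hh⟩; exact ⟨Nat.zero_le _, h, by simpa using hh⟩
    rw [if_congr this rfl rfl]
    omega

-- the c-th column as B builds it (and, after rewriting, as A builds it)
def pvCol (b : List (List (Int × Bool))) (c : Nat) : List (Int × Bool) :=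
  b.map (fun row => PySem.List.pyGetD row (c : Int) (0, false))

theorem pvColsA_eq_map (b : List (List (Int × Bool))) :
    pvColsA b = (List.range b.length).map (pvCol b) := by
  unfold pvColsA
  rw [PySem.List.foldl_append_singleton_eq_map, PySem.List.pyRange_one]
  simp [pvCol, List.map_map, Function.comp]

theorem pvColSum_eq_cnt (n : Nat) (b : List (List (Int × Bool))) (c : Nat)
    (hc : c < n) (hrows : ∀ row ∈ b, n ≤ row.length) :
    pvColSum n b c = pvCntA (pvCol b c) := by
  rw [pvCntA_eq_countP]
  induction b with
  | nil => simp [pvColSum, pvCol]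
  | cons row rest ih =>
    have hr : n ≤ row.length := hrows row (by simp)
    have hcr : c < row.length := by omega
    have hget : PySem.List.pyGetD row (c : Int) (0, false) = row[c] := by
      rw [PySem.List.pyGetD_natCast]
      exact List.getD_eq_getElem row _ hcr
    have hhit : pvHit row c = row[c].2 := by
      simp [pvHit, List.getElem?_eq_getElem hcr]
    simp only [pvColSum, pvCol, List.map_cons, List.sum_cons, List.countP_cons]
    rw [hget, hhit]
    have ihh := ih (fun r hr' => hrows r (by simp [hr']))
    simp only [pvColSum, pvCol] at ihh
    rw [ihh]
    by_cases hm : row[c].2 <;> simp [hm, hc] <;> omega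

theorem pvSelCol_eq_scanA (b : List (List (Int × Bool))) (m : Nat) :
    ∀ (c0 : Nat) (f : Nat → Nat),
    (∀ c, c0 ≤ c → c < c0 + m → f c = pvCntA (pvCol b c)) →
    pvSelCol b c0 ((List.range' c0 m).map f) = pvScanA ((List.range' c0 m).map (pvCol b)) := by
  induction m with
  | zero => intro c0 f _; rfl
  | succ m ih =>
    intro c0 f hf
    rw [List.range'_succ]
    simp only [List.map_cons, pvSelCol, pvScanA]
    have h0 : f c0 = pvCntA (pvCol b c0) := hf c0 (le_refl _) (by omega)
    have hcol : (b.map fun row => PySem.List.pyGetD row ((c0 : Nat) : Int) (0, false)) = pvCol b c0 := rfl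
    rw [hcol, h0]
    by_cases h : pvCntA (pvCol b c0) = 5
    · simp [h]
    · simp only [h, if_false]
      exact ih (c0 + 1) f (fun c hc1 hc2 => hf c (by omega) (by omega))

theorem pvCC_eq_map_range (n : Nat) (cc : List Nat) (hlen : cc.length = n) :
    cc = (List.range' 0 n).map (fun c => cc.getD c 0) := by
  apply List.ext_getElem
  · simp [hlen]
  · intro i h1 h2
    simp only [List.getElem_map, List.getElem_range']
    rw [List.getD_eq_getElem cc 0 (by omega)]
    congr 1
    omega

-- ===== VERDICT (by name: the statement is the Claim_ definition above) =====
theorem winning_line_spec : Claim_equal_winning_line := by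
  intro b _ hpre
  unfold Spec_winning_line
  unfold winning_line winning_line_alt
  have hfst := pvRowFold_fst b.length b [] (List.replicate b.length 0)
  have hlen := pvRowFold_len b.length b [] (List.replicate b.length 0)
  rcases hfold : b.foldl (pvRowStep b.length) ([], List.replicate b.length 0) with ⟨rcs, cc⟩
  rw [hfold] at hfst hlen
  simp only at hfst hlen
  simp only [List.nil_append] at hfst
  subst hfst
  show (match pvScanA b with | some r => some r | none => pvScanA (pvColsA b)) =
       (match pvSelRow (b.map fun r => r.countP (fun p => p.2)) b with
        | some r => some r | none => pvSelCol b 0 cc)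
  rw [pvSelRow_eq_scanA]
  cases hscan : pvScanA b with
  | some r => simp
  | none =>
    simp only
    have hno : ∀ row ∈ b, row.countP (fun p => p.2) ≠ 5 := by
      intro row hrow
      have := (pvScanA_eq_none b).mp hscan row hrow
      rwa [pvCntA_eq_countP] at this
    have hrows : ∀ row ∈ b, b.length ≤ row.length := by
      rcases hpre with ⟨row, hrow, hcnt⟩ | h
      · exact absurd hcnt (hno row hrow)
      · exact h
    have hcclen : cc.length = b.length := by simpa using hlen
    rw [pvColsA_eq_map, List.range_eq_range']
    rw [pvCC_eq_map_range b.length cc hcclen]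
    symm
    apply pvSelCol_eq_scanA
    intro c hc1 hc2
    have hc : c < b.length := by omega
    have := pvRowFold_snd b.length b [] (List.replicate b.length 0) c (by simp)
    rw [hfold] at this
    simp only at this
    rw [this]
    rw [pvColSum_eq_cnt b.length b c hc hrows]
    simp
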